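-- pv_equiv track=rewrite | github.com/gauravcse/Pythonista | Scraper/stemming.py | findV
-- ===== SOURCE A (Python) =====
-- def findV(s):
--     v = "aeiou"
--     v = list(v)
--     sl = list(s[0:-1])
--     for i in v:
--         if(sl.count(i) >0):
--             return 1
--     return 0
-- ===== SOURCE B (Python) =====
-- def findV(s):
--     return 1 if any(c in "aeiou" for c in s[:-1]) else 0
-- ===== Notes on version B (the rewrite author's own statement) =====
-- stated objective: faster
-- what changed: Replaces the five-pass loop (one full .count scan per vowel) with a single short-circuiting pass over the characters of s[:-1] testing vowel membership.
import Mathlib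
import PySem

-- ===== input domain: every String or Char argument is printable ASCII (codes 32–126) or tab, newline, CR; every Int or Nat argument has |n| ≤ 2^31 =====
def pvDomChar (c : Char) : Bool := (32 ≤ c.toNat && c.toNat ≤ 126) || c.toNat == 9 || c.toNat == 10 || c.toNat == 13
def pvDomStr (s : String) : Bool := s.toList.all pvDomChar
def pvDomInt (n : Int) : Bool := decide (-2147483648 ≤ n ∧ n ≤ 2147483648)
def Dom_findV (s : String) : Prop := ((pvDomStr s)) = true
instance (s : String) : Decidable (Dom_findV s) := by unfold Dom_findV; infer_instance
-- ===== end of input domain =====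

-- B replaces A's five .count scans (one per vowel) with a single short-circuiting pass over s[:-1] (simpler).


-- ===== PORT A =====
-- for i in v: if sl.count(i) > 0: return 1 / return 0
def findVLoop (sl : List Char) : List Char → Int
  | [] => 0
  | i :: rest => if PySem.List.count sl i > 0 then 1 else findVLoop sl rest

def findV (s : String) : Int :=
  let v : List Char := "aeiou".toList
  let sl : List Char := PySem.List.slice s.toList (some 0) (some (-1))
  findVLoop sl v

-- ===== PORT B =====
def findV_alt (s : String) : Int :=
  if (PySem.List.slice s.toList none (some (-1))).any
      (fun c => ("aeiou".toList).contains c) then 1 else 0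

-- ===== PRECONDITION & SPEC =====
def Spec_findV (s : String) (out : Int) : Prop := out = findV_alt s
instance (s : String) (out : Int) : Decidable (Spec_findV s out) := by unfold Spec_findV; infer_instance

-- ===== CLAIM (what is proved, stated in full; the proofs are below) =====
def Claim_equal_findV : Prop := ∀ (s : String), Dom_findV s → Spec_findV s (findV s)

-- ===== LEMMAS AND PROOFS =====
theorem findVLoop_eq (sl v : List Char) :
    findVLoop sl v = if sl.any (fun c => v.contains c) then 1 else 0 := by
  induction v with
  | nil => simp [findVLoop]
  | cons i rest ih =>
      simp only [findVLoop, PySem.List.count_eq, ih]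
      by_cases h : i ∈ sl
      · simp [List.count_pos_iff.mpr h, List.any_eq_true]
        exact ⟨i, h, by simp⟩
      · have h0 : sl.count i = 0 := List.count_eq_zero.mpr h
        simp only [h0, lt_irrefl, if_false]
        have heq : (sl.any fun c => (i :: rest).contains c)
            = (sl.any fun c => rest.contains c) := by
          rw [Bool.eq_iff_iff]
          simp only [List.any_eq_true, List.contains_eq_mem, decide_eq_true_eq,
            List.mem_cons]
          constructor
          · rintro ⟨c, hc, rfl | hm⟩
            · exact absurd hc h
            · exact ⟨c, hc, hm⟩
          · rintro ⟨c, hc, hm⟩; exact ⟨c, hc, Or.inr hm⟩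
        rw [heq]

-- ===== VERDICT (by name: the statement is the Claim_ definition above) =====
theorem findV_spec : Claim_equal_findV := by
  intro s _
  unfold Spec_findV findV findV_alt
  simp [findVLoop_eq]
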